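-- pv_equiv track=rewrite | github.com/bchwast/AGH-WDI | Kolokwia 19_20/k2_grB_ex1.py | matrioszka
-- ===== SOURCE A (Python) =====
-- def to_7sys(n):
--     c_n = n
--     l = 0
--     while c_n > 0:
--         l += 1
--         c_n //= 7
--
--     num = [0]*l
--
--     for i in range(l-1, -1, -1):
--         num[i] = n%7
--         n //= 7
--
--     return num
--
-- def ile_niep(num):
--     ilosc = 0
--     for i in range(len(num)):
--         if num[i]%2 == 1:
--             ilosc += 1
--     return ilosc
--
-- def zgodne(n1, n2):
--     num1 = to_7sys(n1)
--     num2 = to_7sys(n2)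
--     return ile_niep(num1) == ile_niep(num2)
--
-- def matrioszka(tab1, tab2):
--     n1 = len(tab1)
--     n2 = len(tab2)
--     for w2 in range(n2-n1):
--         for k2 in range(n2-n1):
--             ilosc = 0
--             for w1 in range(n1):
--                 for k1 in range(n1):
--                     if zgodne(tab1[w1][k1], tab2[w2+w1][k2+k1]):
--                         ilosc += 1
--                 #end for
--             #end for
--             if ilosc >= (n1*n1)/3:
--                 return True
--         #end for
--     #end for
--     return False
-- ===== SOURCE B (Python) =====
-- def matrioszka(tab1, tab2):
--     n1 = len(tab1)
--     n2 = len(tab2)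
--     m = n2 - n1
--     if m <= 0:
--         return False
--     # Precompute the base-7 odd-digit count of every entry once; a window then
--     # matches by integer equality over aligned (zipped) slices.
--     cat1 = [[odd7(v) for v in row[:n1]] for row in tab1]
--     cat2 = [[odd7(v) for v in row] for row in tab2]
--     need = n1 * n1  # ilosc >= n1*n1/3  <=>  3*ilosc >= n1*n1 (exact)
--     return any(
--         3 * sum(a == b
--                 for r1, r2 in zip(cat1, cat2[w2:w2 + n1])
--                 for a, b in zip(r1, r2[k2:k2 + n1])) >= need
--         for w2 in range(m) for k2 in range(m))
--
--
-- def odd7(n):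
--     c = 0
--     while n > 0:
--         c += (n % 7) % 2
--         n //= 7
--     return c
-- ===== Notes on version B (the rewrite author's own statement) =====
-- stated objective: alternative
-- what changed: B computes each entry's base-7 odd-digit count once into two category matrices and decides every window by counting equal entries over zipped slices with an integer threshold, where A re-decomposes both numbers into base-7 digit lists for every one of the (n2-n1)^2 * n1^2 window cells.
-- outside the precondition, e.g. on matrioszka([[345]], [[1471, 68], [], [], []]): A returns True, B returns True
import Mathlib
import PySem

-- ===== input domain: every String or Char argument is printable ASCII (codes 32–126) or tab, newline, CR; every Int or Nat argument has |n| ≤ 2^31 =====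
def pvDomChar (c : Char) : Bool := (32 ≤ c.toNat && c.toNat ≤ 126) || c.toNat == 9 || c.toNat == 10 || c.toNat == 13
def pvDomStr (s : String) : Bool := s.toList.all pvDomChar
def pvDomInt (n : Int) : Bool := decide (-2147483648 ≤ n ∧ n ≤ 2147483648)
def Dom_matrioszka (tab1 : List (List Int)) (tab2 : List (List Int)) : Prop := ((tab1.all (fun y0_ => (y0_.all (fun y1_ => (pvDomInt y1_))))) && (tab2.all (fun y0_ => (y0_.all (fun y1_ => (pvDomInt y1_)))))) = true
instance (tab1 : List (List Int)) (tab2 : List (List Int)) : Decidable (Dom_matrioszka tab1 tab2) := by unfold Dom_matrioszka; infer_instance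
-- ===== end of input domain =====

-- B precomputes each entry's base-7 odd-digit count once into category matrices and
-- decides each window by counting equal entries over zipped slices, instead of A's
-- re-decomposition of both numbers into digit lists at every window cell (alternative).


-- ===== PORT A =====

-- 'c_n = n; l = 0; while c_n > 0: l += 1; c_n //= 7'
def lenWhile (n : Int) : Nat :=
  if _h : 0 < n then lenWhile (PySem.Int.floordiv n 7) + 1 else 0
termination_by n.toNat
decreasing_by
  rw [PySem.Int.floordiv_eq_ediv_of_pos (by norm_num : (0:Int) < 7)]
  omega

-- the second loop of to_7sys: 'for i in range(l-1, -1, -1): num[i] = n%7; n //= 7'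
-- (successive remainders written from the back of num, i.e. prepended)
def to7go : Nat → Int → List Int
  | 0, _ => []
  | l + 1, n => to7go l (PySem.Int.floordiv n 7) ++ [PySem.Int.mod n 7]

def to7sys (n : Int) : List Int := to7go (lenWhile n) n

-- 'for i in range(len(num)): if num[i] % 2 == 1: ilosc += 1' (a left fold over num)
def ileNiep (num : List Int) : Int :=
  num.foldl (fun ilosc d => if PySem.Int.mod d 2 = 1 then ilosc + 1 else ilosc) 0

def zgodne (a b : Int) : Bool := ileNiep (to7sys a) == ileNiep (to7sys b)

-- the 'for … return True / return False' ladder is 'any' over the same ranges;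
-- xs[i] with an in-range nonnegative index is List.getD (raising indices are outside Pre_);
-- 'ilosc >= (n1*n1)/3' (true division) is exact as '3*ilosc >= n1*n1' (n1*n1 < 2^53)
def matrioszka (tab1 : List (List Int)) (tab2 : List (List Int)) : Bool :=
  let n1 := tab1.length
  let n2 := tab2.length
  (List.range (n2 - n1)).any (fun w2 =>
    (List.range (n2 - n1)).any (fun k2 =>
      let ilosc : Int :=
        (List.range n1).foldl (fun acc w1 =>
          (List.range n1).foldl (fun acc k1 =>
            if zgodne ((tab1.getD w1 []).getD k1 0) ((tab2.getD (w2 + w1) []).getD (k2 + k1) 0)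
            then acc + 1 else acc) acc) 0
      decide (3 * ilosc ≥ (n1 : Int) * n1)))

-- ===== PORT B =====

-- 'c = 0; while n > 0: c += (n % 7) % 2; n //= 7'
def odd7go (n c : Int) : Int :=
  if _h : 0 < n then odd7go (PySem.Int.floordiv n 7) (c + PySem.Int.mod (PySem.Int.mod n 7) 2) else c
termination_by n.toNat
decreasing_by
  rw [PySem.Int.floordiv_eq_ediv_of_pos (by norm_num : (0:Int) < 7)]
  omega

def odd7 (n : Int) : Int := odd7go n 0

-- Source B: category matrices once, then 'any' of zipped-slice match counts per offset;
-- 'sum(a == b for …)' is countP over the zip; threshold as in Source B: 3*c >= n1*n1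
def matrioszka_alt (tab1 : List (List Int)) (tab2 : List (List Int)) : Bool :=
  let n1 := tab1.length
  let n2 := tab2.length
  if n2 ≤ n1 then false else
  let m := n2 - n1
  let cat1 := tab1.map (fun row => (row.take n1).map odd7)
  let cat2 := tab2.map (fun row => row.map odd7)
  (List.range m).any (fun w2 =>
    (List.range m).any (fun k2 =>
      let c : Int :=
        ((cat1.zip ((cat2.drop w2).take n1)).map (fun rr =>
          (((rr.1.zip ((rr.2.drop k2).take n1)).countP (fun ab => ab.1 == ab.2) : Nat) : Int))).sum
      decide (3 * c ≥ (n1 : Int) * n1)))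

-- ===== PRECONDITION & SPEC =====
-- Pre_ excludes jagged inputs — a row of tab1 shorter than len(tab1), or a swept row of
-- tab2 (all but the last, which the loops never index) shorter than len(tab2)-1 — on which
-- A raises IndexError, except that A can still return True early when a matching window
-- precedes the short row; those early returns are excluded with the crash cases.
def Pre_matrioszka (tab1 : List (List Int)) (tab2 : List (List Int)) : Prop :=
  tab2.length ≤ tab1.length ∨ tab1 = [] ∨
  ((∀ r ∈ tab1, tab1.length ≤ r.length) ∧ (∀ r ∈ tab2.dropLast, tab2.length - 1 ≤ r.length))
instance (tab1 : List (List Int)) (tab2 : List (List Int)) : Decidable (Pre_matrioszka tab1 tab2) := by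
  unfold Pre_matrioszka; infer_instance

def pvWitness_matrioszka : List (List Int) × List (List Int) := ([[7]], [[1, 2], [3, 4]])

def Spec_matrioszka (tab1 : List (List Int)) (tab2 : List (List Int)) (out : Bool) : Prop := out = matrioszka_alt tab1 tab2
instance (tab1 : List (List Int)) (tab2 : List (List Int)) (out : Bool) : Decidable (Spec_matrioszka tab1 tab2 out) := by unfold Spec_matrioszka; infer_instance

-- ===== CLAIM (what is proved, stated in full; the proofs are below) =====
def Claim_equal_matrioszka : Prop := ∀ (tab1 : List (List Int)) (tab2 : List (List Int)), Dom_matrioszka tab1 tab2 → Pre_matrioszka tab1 tab2 → Spec_matrioszka tab1 tab2 (matrioszka tab1 tab2)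

-- ===== LEMMAS AND PROOFS =====

theorem odd7go_pos {n : Int} (c : Int) (h : 0 < n) :
    odd7go n c = odd7go (PySem.Int.floordiv n 7) (c + PySem.Int.mod (PySem.Int.mod n 7) 2) := by
  rw [odd7go]; simp [h]

theorem odd7go_neg {n : Int} (c : Int) (h : ¬ 0 < n) : odd7go n c = c := by
  rw [odd7go]; simp [h]

theorem fdiv7_toNat_lt {n : Int} (h : 0 < n) : (PySem.Int.floordiv n 7).toNat < n.toNat := by
  rw [PySem.Int.floordiv_eq_ediv_of_pos (by norm_num : (0:Int) < 7)]
  omega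

-- odd7go with an accumulator is the accumulator plus odd7go from 0
theorem odd7go_acc (n c : Int) : odd7go n c = c + odd7go n 0 := by
  have H : ∀ (k : Nat) (n c : Int), n.toNat ≤ k → odd7go n c = c + odd7go n 0 := by
    intro k
    induction k with
    | zero =>
      intro n c h
      have hn : ¬ 0 < n := by omega
      rw [odd7go_neg c hn, odd7go_neg 0 hn]; ring
    | succ k ih =>
      intro n c h
      by_cases hp : 0 < n
      · have hlt : (PySem.Int.floordiv n 7).toNat ≤ k := by
          have := fdiv7_toNat_lt hp; omega
        rw [odd7go_pos c hp, odd7go_pos 0 hp, ih _ _ hlt, ih _ (0 + _) hlt]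
        ring
      · rw [odd7go_neg c hp, odd7go_neg 0 hp]; ring
  exact H n.toNat n c le_rfl

theorem lenWhile_pos {n : Int} (h : 0 < n) : lenWhile n = lenWhile (PySem.Int.floordiv n 7) + 1 := by
  rw [lenWhile]; simp [h]

theorem lenWhile_neg {n : Int} (h : ¬ 0 < n) : lenWhile n = 0 := by
  rw [lenWhile]; simp [h]

theorem to7sys_pos {n : Int} (h : 0 < n) :
    to7sys n = to7sys (PySem.Int.floordiv n 7) ++ [PySem.Int.mod n 7] := by
  rw [to7sys, lenWhile_pos h, to7go, to7sys]

theorem ileNiep_append (xs : List Int) (d : Int) :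
    ileNiep (xs ++ [d]) = if PySem.Int.mod d 2 = 1 then ileNiep xs + 1 else ileNiep xs := by
  rw [ileNiep, List.foldl_append]; rfl

-- A's digit-list odd count equals B's running odd count
theorem ileNiep_to7sys (n : Int) : ileNiep (to7sys n) = odd7 n := by
  have H : ∀ (k : Nat) (n : Int), n.toNat ≤ k → ileNiep (to7sys n) = odd7 n := by
    intro k
    induction k with
    | zero =>
      intro n h
      have hn : ¬ 0 < n := by omega
      rw [to7sys, lenWhile_neg hn, odd7, odd7go_neg 0 hn]
      rfl
    | succ k ih =>
      intro n h
      by_cases hp : 0 < n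
      · have hlt : (PySem.Int.floordiv n 7).toNat ≤ k := by
          have := fdiv7_toNat_lt hp; omega
        have hmb : 0 ≤ PySem.Int.mod (PySem.Int.mod n 7) 2 ∧ PySem.Int.mod (PySem.Int.mod n 7) 2 < 2 :=
          ⟨PySem.Int.mod_nonneg _ (by norm_num), PySem.Int.mod_lt _ (by norm_num)⟩
        have hr : odd7 n = PySem.Int.mod (PySem.Int.mod n 7) 2 + odd7 (PySem.Int.floordiv n 7) := by
          unfold odd7; rw [odd7go_pos 0 hp, odd7go_acc]; ring
        rw [to7sys_pos hp, ileNiep_append, ih _ hlt, hr]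
        by_cases hd : PySem.Int.mod (PySem.Int.mod n 7) 2 = 1
        · rw [hd, if_pos rfl]; ring
        · have h0 : PySem.Int.mod (PySem.Int.mod n 7) 2 = 0 := by omega
          rw [h0, if_neg (by norm_num)]; ring
      · rw [to7sys, lenWhile_neg hp, odd7, odd7go_neg 0 hp]; rfl
  exact H n.toNat n le_rfl

theorem zgodne_eq (a b : Int) : zgodne a b = (odd7 a == odd7 b) := by
  rw [zgodne, ileNiep_to7sys, ileNiep_to7sys]

-- a sum over a zip of two sufficiently long lists is a sum over indices
theorem sum_map_zip {a b : Type} (f : a → b → Int) (dx : a) (dy : b) :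
    ∀ (xs : List a) (ys : List b), xs.length ≤ ys.length →
    ((xs.zip ys).map (fun q => f q.1 q.2)).sum
      = ((List.range xs.length).map (fun i => f (xs.getD i dx) (ys.getD i dy))).sum := by
  intro xs
  induction xs with
  | nil => intro ys h; simp
  | cons x xs ih =>
    intro ys h
    cases ys with
    | nil => simp at h
    | cons y ys =>
      simp only [List.zip_cons_cons, List.map_cons, List.sum_cons, List.length_cons,
        List.range_succ_eq_map, List.map_map]
      rw [ih ys (by simpa using h)]
      refine congrArg _ (congrArg List.sum (List.map_congr_left ?_))
      intro i hi
      simp [Function.comp]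

-- a count over a zip of two sufficiently long lists is a count over indices
theorem countP_zip {a b : Type} (p : a → b → Bool) (dx : a) (dy : b) :
    ∀ (xs : List a) (ys : List b), xs.length ≤ ys.length →
    ((xs.zip ys).countP (fun q => p q.1 q.2))
      = ((List.range xs.length).countP (fun i => p (xs.getD i dx) (ys.getD i dy))) := by
  intro xs
  induction xs with
  | nil => intro ys h; simp
  | cons x xs ih =>
    intro ys h
    cases ys with
    | nil => simp at h
    | cons y ys =>
      simp only [List.zip_cons_cons, List.countP_cons, List.length_cons,
        List.range_succ_eq_map, List.countP_map]
      rw [ih ys (by simpa using h)]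
      refine congrArg₂ _ (List.countP_congr ?_) rfl
      intro i hi
      simp [Function.comp]

-- the window-count equality: A's fold of zgodne tests = B's zipped-slice count
theorem window_eq (tab1 tab2 : List (List Int))
    (h1 : ∀ r ∈ tab1, tab1.length ≤ r.length)
    (h2 : ∀ r ∈ tab2.dropLast, tab2.length - 1 ≤ r.length)
    (hlt : tab1.length < tab2.length)
    (w2 k2 : Nat) (hw2 : w2 < tab2.length - tab1.length) (hk2 : k2 < tab2.length - tab1.length) :
    (List.range tab1.length).foldl (fun acc w1 =>
        (List.range tab1.length).foldl (fun acc k1 =>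
          if zgodne ((tab1.getD w1 []).getD k1 0) ((tab2.getD (w2 + w1) []).getD (k2 + k1) 0)
          then acc + 1 else acc) acc) (0:Int)
    = (((tab1.map (fun row => (row.take tab1.length).map odd7)).zip
         (((tab2.map (fun row => row.map odd7)).drop w2).take tab1.length)).map (fun rr =>
           (((rr.1.zip ((rr.2.drop k2).take tab1.length)).countP (fun ab => ab.1 == ab.2) : Nat) : Int))).sum := by
  -- A's side: the nested counting fold is a sum over row indices of per-row counts
  have hA : (List.range tab1.length).foldl (fun acc w1 =>
        (List.range tab1.length).foldl (fun acc k1 =>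
          if zgodne ((tab1.getD w1 []).getD k1 0) ((tab2.getD (w2 + w1) []).getD (k2 + k1) 0)
          then acc + 1 else acc) acc) (0:Int)
      = ((List.range tab1.length).map (fun w1 =>
          (((List.range tab1.length).countP (fun k1 =>
            zgodne ((tab1.getD w1 []).getD k1 0) ((tab2.getD (w2 + w1) []).getD (k2 + k1) 0)) : Nat) : Int))).sum := by
    rw [PySem.List.foldl_congr_mem (List.range tab1.length) _
        (fun acc w1 => acc + (((List.range tab1.length).countP (fun k1 =>
            zgodne ((tab1.getD w1 []).getD k1 0) ((tab2.getD (w2 + w1) []).getD (k2 + k1) 0)) : Nat) : Int))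
        0 (fun acc w1 _ => PySem.List.foldl_if_add_one _ _ _)]
    rw [PySem.List.foldl_add]
    simp
  rw [hA]
  -- B's side: the sum over the zipped window is a sum over the same row indices
  have hB := sum_map_zip (fun r1 r2 =>
        (((r1.zip ((r2.drop k2).take tab1.length)).countP (fun ab => ab.1 == ab.2) : Nat) : Int)) [] []
      (tab1.map (fun row => (row.take tab1.length).map odd7))
      (((tab2.map (fun row => row.map odd7)).drop w2).take tab1.length)
      (by simp; omega)
  simp only [] at hB
  rw [hB]
  simp only [List.length_map]
  refine congrArg List.sum (List.map_congr_left ?_)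
  intro w1 hw1
  replace hw1 : w1 < tab1.length := List.mem_range.mp hw1
  have hw2w1 : w2 + w1 < tab2.length := by omega
  have hrow1 : tab1.length ≤ tab1[w1].length := h1 _ (List.getElem_mem hw1)
  have hdl : w2 + w1 < tab2.dropLast.length := by
    rw [List.length_dropLast]; omega
  have hrow2 : tab2.length - 1 ≤ tab2[w2 + w1].length := by
    have h := h2 _ (List.getElem_mem hdl)
    rwa [List.getElem_dropLast] at h
  -- name the two rows
  have e1 : (tab1.map (fun row => (row.take tab1.length).map odd7)).getD w1 []
      = (tab1[w1].take tab1.length).map odd7 := by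
    rw [List.getD_eq_getElem _ _ (by simpa using hw1), List.getElem_map]
  have e2 : ((((tab2.map (fun row => row.map odd7)).drop w2).take tab1.length).getD w1 [])
      = tab2[w2 + w1].map odd7 := by
    rw [List.getD_eq_getElem _ _ (by simp; omega), List.getElem_take, List.getElem_drop,
      List.getElem_map]
  rw [e1, e2]
  rw [countP_zip (fun x y => x == y) 0 0 _ _ (by simp; omega)]
  have hlen1 : ((tab1[w1].take tab1.length).map odd7).length = tab1.length := by
    simp; omega
  rw [hlen1]
  refine congrArg _ (List.countP_congr ?_)
  intro k1 hk1
  replace hk1 : k1 < tab1.length := List.mem_range.mp hk1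
  rw [List.getD_eq_getElem tab1 [] hw1, List.getD_eq_getElem tab2 [] hw2w1]
  rw [List.getD_eq_getElem _ _ (by omega : k1 < tab1[w1].length),
      List.getD_eq_getElem _ _ (by omega : k2 + k1 < tab2[w2 + w1].length)]
  rw [List.getD_eq_getElem _ _ (by simp; omega), List.getElem_map, List.getElem_take]
  rw [List.getD_eq_getElem _ _ (by simp; omega), List.getElem_take, List.getElem_drop,
      List.getElem_map]
  rw [zgodne_eq]

-- ===== VERDICT (by name: the statement is the Claim_ definition above) =====
theorem matrioszka_spec : Claim_equal_matrioszka := by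
  intro tab1 tab2 _dom hpre
  unfold Spec_matrioszka
  show matrioszka tab1 tab2 = matrioszka_alt tab1 tab2
  simp only [matrioszka, matrioszka_alt]
  by_cases hle : tab2.length ≤ tab1.length
  · rw [if_pos hle]
    have h0 : tab2.length - tab1.length = 0 := by omega
    simp [h0]
  · rw [if_neg hle]
    refine PySem.List.any_congr_mem ?_
    intro w2 hw2
    refine PySem.List.any_congr_mem ?_
    intro k2 hk2
    have hw2' : w2 < tab2.length - tab1.length := List.mem_range.mp hw2
    have hk2' : k2 < tab2.length - tab1.length := List.mem_range.mp hk2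
    have hlt : tab1.length < tab2.length := by omega
    rcases hpre with hp | hp | hp
    · omega
    · -- tab1 = []: both window counts are 0
      subst hp
      simp
    · rw [window_eq tab1 tab2 hp.1 hp.2 hlt w2 k2 hw2' hk2']
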